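-- pv_equiv track=rewrite | github.com/dongspam0209/codetree-TILs | 240502/Carry 피하기 2/escaping-carry-2.py | calculate_carry
-- ===== SOURCE A (Python) =====
-- def calculate_carry(a,b,c):
--     calculate_result=[]
--     while a>0 or b>0 or c>0:
--         position_sum=0
--         position_sum=a%10+b%10+c%10
--         if position_sum>=10:
--             calculate_result.append(-1)
--             break
--         calculate_result.append(position_sum)
--         a//=10
--         b//=10
--         c//=10
--     return calculate_result
-- ===== SOURCE B (Python) =====
-- def calculate_carry(a, b, c):
--     # number of digit positions: smallest k with 10**k exceeding every operand
--     m = max(a, b, c)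
--     k = 0
--     while 10 ** k <= m:
--         k += 1
--     # digit sums by positional indexing (no destructive division of a, b, c)
--     sums = [(a // 10 ** i) % 10 + (b // 10 ** i) % 10 + (c // 10 ** i) % 10
--             for i in range(k)]
--     # truncate at the first carry
--     for i, s in enumerate(sums):
--         if s >= 10:
--             return sums[:i] + [-1]
--     return sums
-- ===== Notes on version B (the rewrite author's own statement) =====
-- stated objective: alternative
-- what changed: B never destructively divides a,b,c: it first computes the digit-position count k by growing a power of ten past max(a,b,c), extracts each position sum directly as (x // 10**i) % 10 over range(k), and then truncates the sum list at the first carry with -1.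
import Mathlib
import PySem

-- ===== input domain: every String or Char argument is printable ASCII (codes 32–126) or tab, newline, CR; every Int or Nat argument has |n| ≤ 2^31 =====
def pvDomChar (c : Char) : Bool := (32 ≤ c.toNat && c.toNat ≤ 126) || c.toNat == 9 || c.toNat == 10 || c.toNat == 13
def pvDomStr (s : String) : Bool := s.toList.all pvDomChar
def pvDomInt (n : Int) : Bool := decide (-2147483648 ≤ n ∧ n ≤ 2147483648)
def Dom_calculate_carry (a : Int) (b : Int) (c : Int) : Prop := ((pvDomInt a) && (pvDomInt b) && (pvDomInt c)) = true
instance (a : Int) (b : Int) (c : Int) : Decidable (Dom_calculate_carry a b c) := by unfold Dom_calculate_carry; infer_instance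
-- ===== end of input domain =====

-- B avoids A's destructive repeated division of a,b,c: it first counts the digit
-- positions k by growing a power of ten past max(a,b,c), extracts each position sum
-- directly as (x // 10**i) % 10 over range(k), then truncates at the first carry
-- (objective: alternative).

-- ===== PORT A =====
-- A's while loop (with break), as recursion on the loop state; the fuel
-- a.toNat+b.toNat+c.toNat strictly bounds the iteration count (each positive
-- argument shrinks under //10), so the fuel-0 branch is never the reason to stop.
def pvLoopA : Nat → Int → Int → Int → List Int
  | 0, _, _, _ => []
  | fuel + 1, a, b, c =>
    if a > 0 ∨ b > 0 ∨ c > 0 then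
      let position_sum := PySem.Int.mod a 10 + PySem.Int.mod b 10 + PySem.Int.mod c 10
      if position_sum ≥ 10 then [-1]
      else position_sum ::
        pvLoopA fuel (PySem.Int.floordiv a 10) (PySem.Int.floordiv b 10) (PySem.Int.floordiv c 10)
    else []

def calculate_carry (a : Int) (b : Int) (c : Int) : List Int :=
  pvLoopA (a.toNat + b.toNat + c.toNat) a b c

-- ===== PORT B =====
-- Source B's count loop 'while 10**k <= m: k += 1', as fuel recursion; for m ≥ 1 the loop
-- runs at most m.toNat times (10^k ≥ k+1), so the fuel m.toNat+1 is never the reason to stop.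
def pvCountK : Nat → Int → Nat → Nat
  | 0, _, k => k
  | fuel + 1, m, k => if (10:Int) ^ k ≤ m then pvCountK fuel m (k + 1) else k

-- Source B's final enumerate loop: index of the first element ≥ 10
def pvFindCarry : List Int → Nat → Option Nat
  | [], _ => none
  | s :: rest, i => if s ≥ 10 then some i else pvFindCarry rest (i + 1)

def calculate_carry_alt (a : Int) (b : Int) (c : Int) : List Int :=
  let m := max a (max b c)
  let k := pvCountK (m.toNat + 1) m 0
  let sums := (List.range k).map (fun i =>
    PySem.Int.mod (PySem.Int.floordiv a ((10:Int) ^ i)) 10 +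
    PySem.Int.mod (PySem.Int.floordiv b ((10:Int) ^ i)) 10 +
    PySem.Int.mod (PySem.Int.floordiv c ((10:Int) ^ i)) 10)
  match pvFindCarry sums 0 with
  | some i => sums.take i ++ [-1]
  | none => sums

-- ===== PRECONDITION & SPEC =====
def Spec_calculate_carry (a : Int) (b : Int) (c : Int) (out : List Int) : Prop := out = calculate_carry_alt a b c
instance (a : Int) (b : Int) (c : Int) (out : List Int) : Decidable (Spec_calculate_carry a b c out) := by unfold Spec_calculate_carry; infer_instance

-- ===== CLAIM (what is proved, stated in full; the proofs are below) =====
def Claim_equal_calculate_carry : Prop := ∀ (a : Int) (b : Int) (c : Int), Dom_calculate_carry a b c → Spec_calculate_carry a b c (calculate_carry a b c)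

-- ===== LEMMAS AND PROOFS =====

-- proof-side: the digit-sum list A's loop would produce without the carry break
def pvLoopSums : Nat → Int → Int → Int → List Int
  | 0, _, _, _ => []
  | fuel + 1, a, b, c =>
    if a > 0 ∨ b > 0 ∨ c > 0 then
      (PySem.Int.mod a 10 + PySem.Int.mod b 10 + PySem.Int.mod c 10) ::
        pvLoopSums fuel (PySem.Int.floordiv a 10) (PySem.Int.floordiv b 10) (PySem.Int.floordiv c 10)
    else []

-- proof-side: truncate a list at its first element ≥ 10
def pvCut : List Int → List Int
  | [] => []
  | s :: rest => if s ≥ 10 then [-1] else s :: pvCut rest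

-- proof-side: the number of digit positions, by well-founded recursion
def pvK (m : Int) : Nat :=
  if h : 0 < m then pvK (m / 10) + 1 else 0
  termination_by m.toNat
  decreasing_by omega

theorem pvFindCarry_succ (xs : List Int) (i : Nat) :
    pvFindCarry xs (i + 1) = (pvFindCarry xs i).map (· + 1) := by
  induction xs generalizing i with
  | nil => rfl
  | cons x rest ih =>
    simp only [pvFindCarry]
    split_ifs with hx
    · rfl
    · exact ih (i + 1)

theorem pvPost_eq_cut (xs : List Int) :
    (match pvFindCarry xs 0 with
     | some i => xs.take i ++ [-1]
     | none => xs) = pvCut xs := by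
  induction xs with
  | nil => rfl
  | cons x rest ih =>
    simp only [pvFindCarry, pvCut]
    split_ifs with hx
    · simp
    · rw [pvFindCarry_succ]
      cases hf : pvFindCarry rest 0 with
      | none => simp [hf] at ih ⊢; exact ih
      | some j => simp [hf] at ih ⊢; simpa using ih

theorem pvLoopA_eq_cut_sums (fuel : Nat) (a b c : Int) :
    pvLoopA fuel a b c = pvCut (pvLoopSums fuel a b c) := by
  induction fuel generalizing a b c with
  | zero => rfl
  | succ f ih =>
    simp only [pvLoopA, pvLoopSums]
    split_ifs with hc hs
    · rw [pvCut, if_pos hs]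
    · rw [pvCut, if_neg hs, ih]
    · rfl

-- 10^k ≤ m  ↔  k < pvK m
theorem pvK_pow_iff (m : Int) : ∀ k : Nat, ((10:Int) ^ k ≤ m ↔ k < pvK m) := by
  induction m using pvK.induct with
  | case1 m hm ih =>
    intro k
    rw [pvK, dif_pos hm]
    cases k with
    | zero => simpa using hm
    | succ j =>
      rw [pow_succ, ← Int.le_ediv_iff_mul_le (show (0:Int) < 10 by norm_num)]
      rw [ih j]; omega
  | case2 m hm =>
    intro k
    rw [pvK, dif_neg hm]
    have hp : (0:Int) < 10 ^ k := by positivity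
    constructor
    · intro h; omega
    · intro h; omega

theorem pvK_le_toNat (m : Int) : pvK m ≤ m.toNat := by
  induction m using pvK.induct with
  | case1 m hm ih => rw [pvK, dif_pos hm]; omega
  | case2 m hm => rw [pvK, dif_neg hm]; omega

theorem pvCountK_eq (fuel k : Nat) (m : Int) (hk : k ≤ pvK m) (hf : pvK m ≤ k + fuel) :
    pvCountK fuel m k = pvK m := by
  induction fuel generalizing k with
  | zero => simp only [pvCountK]; omega
  | succ f ih =>
    simp only [pvCountK]
    split_ifs with h
    · rw [pvK_pow_iff] at h
      exact ih (k + 1) h (by omega)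
    · rw [pvK_pow_iff] at h; omega

theorem pvFloordiv_max (a b : Int) :
    PySem.Int.floordiv (max a b) 10 = max (PySem.Int.floordiv a 10) (PySem.Int.floordiv b 10) := by
  simp only [PySem.Int.floordiv_eq_ediv_of_pos (by norm_num : (0:Int) < 10)]
  rcases le_total a b with h | h
  · rw [max_eq_right h, max_eq_right (Int.ediv_le_ediv (by norm_num) h)]
  · rw [max_eq_left h, max_eq_left (Int.ediv_le_ediv (by norm_num) h)]

-- shifting the position index by one = dividing the operand once by 10
theorem pvShift (a : Int) (i : Nat) :
    PySem.Int.floordiv a ((10:Int) ^ (i + 1)) =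
    PySem.Int.floordiv (PySem.Int.floordiv a 10) ((10:Int) ^ i) := by
  simp only [PySem.Int.floordiv_eq_ediv_of_pos (by positivity : (0:Int) < 10 ^ (i+1)),
    PySem.Int.floordiv_eq_ediv_of_pos (by positivity : (0:Int) < 10 ^ i),
    PySem.Int.floordiv_eq_ediv_of_pos (by norm_num : (0:Int) < 10)]
  rw [Int.ediv_ediv_of_nonneg (by norm_num : (0:Int) ≤ 10), pow_succ']

-- the positional digit-sum list of length pvK(max) equals A's loop's sum list
theorem pvSums_eq (fuel : Nat) (a b c : Int)
    (hf : a.toNat + b.toNat + c.toNat ≤ fuel) :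
    pvLoopSums fuel a b c =
    (List.range (pvK (max a (max b c)))).map (fun i =>
      PySem.Int.mod (PySem.Int.floordiv a ((10:Int) ^ i)) 10 +
      PySem.Int.mod (PySem.Int.floordiv b ((10:Int) ^ i)) 10 +
      PySem.Int.mod (PySem.Int.floordiv c ((10:Int) ^ i)) 10) := by
  induction fuel generalizing a b c with
  | zero =>
    have hm : ¬ (0 < max a (max b c)) := by simp only [lt_max_iff]; omega
    rw [pvK, dif_neg hm]
    simp [pvLoopSums]
  | succ f ih =>
    by_cases hcond : a > 0 ∨ b > 0 ∨ c > 0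
    · have hm : 0 < max a (max b c) := by simp only [lt_max_iff]; omega
      have hfd : ∀ x : Int, (PySem.Int.floordiv x 10).toNat ≤ x.toNat ∧
          (0 < x → (PySem.Int.floordiv x 10).toNat < x.toNat) := by
        intro x
        rw [PySem.Int.floordiv_eq_ediv_of_pos (by norm_num : (0:Int) < 10)]
        constructor
        · omega
        · intro hx; omega
      have hfuel : (PySem.Int.floordiv a 10).toNat + (PySem.Int.floordiv b 10).toNat +
          (PySem.Int.floordiv c 10).toNat ≤ f := by
        rcases hcond with h | h | h
        · have := (hfd a).2 h; have := (hfd b).1; have := (hfd c).1; omega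
        · have := (hfd a).1; have := (hfd b).2 h; have := (hfd c).1; omega
        · have := (hfd a).1; have := (hfd b).1; have := (hfd c).2 h; omega
      have hdm : (max a (max b c)) / 10 =
          max (PySem.Int.floordiv a 10) (max (PySem.Int.floordiv b 10) (PySem.Int.floordiv c 10)) := by
        rw [← PySem.Int.floordiv_eq_ediv_of_pos (by norm_num : (0:Int) < 10),
          pvFloordiv_max, pvFloordiv_max]
      rw [pvK, dif_pos hm, hdm]
      rw [pvLoopSums, if_pos hcond,
        ih (PySem.Int.floordiv a 10) (PySem.Int.floordiv b 10) (PySem.Int.floordiv c 10) hfuel,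
        List.range_succ_eq_map, List.map_cons, List.map_map]
      have hone : ∀ x : Int, PySem.Int.floordiv x ((10:Int) ^ 0) = x := by
        intro x
        rw [pow_zero, PySem.Int.floordiv_eq_ediv_of_pos (by norm_num : (0:Int) < 1), Int.ediv_one]
      refine congrArg₂ _ (by rw [hone, hone, hone]) ?_
      refine List.map_congr_left (fun i _ => ?_)
      simp only [Function.comp_apply, pvShift]
    · have hm : ¬ (0 < max a (max b c)) := by simp only [lt_max_iff]; omega
      rw [pvK, dif_neg hm]
      simp [pvLoopSums, hcond]

-- ===== VERDICT (by name: the statement is the Claim_ definition above) =====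
theorem calculate_carry_spec : Claim_equal_calculate_carry := by
  intro a b c _
  unfold Spec_calculate_carry calculate_carry_alt calculate_carry
  have hk : pvCountK ((max a (max b c)).toNat + 1) (max a (max b c)) 0 = pvK (max a (max b c)) :=
    pvCountK_eq _ 0 _ (Nat.zero_le _) (by have := pvK_le_toNat (max a (max b c)); omega)
  simp only [hk, pvPost_eq_cut]
  rw [pvLoopA_eq_cut_sums, pvSums_eq _ a b c (le_refl _)]
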